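-- pv_equiv track=rewrite | github.com/mengyuqianxun/coding-interview-Python | jianzhioffer/21.py | power_postive_exponent
-- ===== SOURCE A (Python) =====
-- def power_postive_exponent(base,exponent):
-- 	if exponent == 0:
-- 		return 1
-- 	if exponent == 1:
-- 		return base
-- 	result = power_postive_exponent(base,exponent>>1)
-- 	result *= result
-- 	if exponent & 0x1 == 1:
-- 		result *= base
-- 	return result
-- ===== SOURCE B (Python) =====
-- def _f(b, exp, acc):
-- 	if exp == 0:
-- 		return acc
-- 	if exp & 0x1 == 1:
-- 		acc *= b
-- 	return _f(b * b, exp >> 1, acc)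
--
-- def power_postive_exponent(base, exponent):
-- 	return _f(base, exponent, 1)
-- ===== Notes on version B (the rewrite author's own statement) =====
-- stated objective: alternative
-- what changed: Top-down divide-and-square recursion replaced by a bottom-up tail-recursive accumulator scanning the exponent's bits from the least-significant end (result and running square carried as accumulators).
import Mathlib
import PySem

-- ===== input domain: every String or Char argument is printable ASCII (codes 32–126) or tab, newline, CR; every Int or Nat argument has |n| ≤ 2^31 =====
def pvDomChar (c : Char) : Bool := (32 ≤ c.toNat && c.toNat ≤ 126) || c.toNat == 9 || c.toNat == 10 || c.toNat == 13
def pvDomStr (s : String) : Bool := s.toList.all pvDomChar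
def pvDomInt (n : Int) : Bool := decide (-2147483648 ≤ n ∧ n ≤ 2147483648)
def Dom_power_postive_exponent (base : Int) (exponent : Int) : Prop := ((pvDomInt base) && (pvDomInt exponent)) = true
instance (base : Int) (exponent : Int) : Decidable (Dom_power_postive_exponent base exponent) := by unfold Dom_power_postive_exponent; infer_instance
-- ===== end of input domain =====

-- B replaces A's top-down divide-and-square recursion by a bottom-up tail-recursive
-- accumulator over the exponent's bits (objective: alternative decomposition, same cost).


-- ===== PORT A =====
-- A's recursion `power_postive_exponent(base, exponent>>1)`; for exponent ≥ 0 (the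
-- domain admitted by Pre_) `exponent >> 1` is Nat division by 2, so the recursion is
-- carried out on the Nat value of the exponent (A diverges on negative exponents,
-- which Pre_ excludes).
def powA (base : Int) (e : Nat) : Int :=
  if e = 0 then 1
  else if e = 1 then base
  else
    let result := powA base (e / 2)
    let result := result * result
    if e % 2 = 1 then result * base else result
termination_by e
decreasing_by omega

def power_postive_exponent (base : Int) (exponent : Int) : Int :=
  powA base exponent.toNat

-- ===== PORT B =====
-- Source B's tail-recursive accumulator helper _f(b, exp, acc), recursing on exp >> 1.
def powB (b : Int) (e : Nat) (acc : Int) : Int :=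
  if e = 0 then acc
  else powB (b * b) (e / 2) (if e % 2 = 1 then acc * b else acc)
termination_by e
decreasing_by omega

def power_postive_exponent_alt (base : Int) (exponent : Int) : Int :=
  powB base exponent.toNat 1

-- ===== PRECONDITION & SPEC =====
-- Pre_ excludes negative exponents, on which the Python A (and B) recurse forever
-- (-1 >> 1 = -1) and die with RecursionError.
def Pre_power_postive_exponent (base : Int) (exponent : Int) : Prop := 0 ≤ exponent
instance (base : Int) (exponent : Int) : Decidable (Pre_power_postive_exponent base exponent) := by unfold Pre_power_postive_exponent; infer_instance
def pvWitness_power_postive_exponent : Int × Int := (3, 5)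

def Spec_power_postive_exponent (base : Int) (exponent : Int) (out : Int) : Prop := out = power_postive_exponent_alt base exponent
instance (base : Int) (exponent : Int) (out : Int) : Decidable (Spec_power_postive_exponent base exponent out) := by unfold Spec_power_postive_exponent; infer_instance

-- ===== CLAIM (what is proved, stated in full; the proofs are below) =====
def Claim_equal_power_postive_exponent : Prop := ∀ (base : Int) (exponent : Int), Dom_power_postive_exponent base exponent → Pre_power_postive_exponent base exponent → Spec_power_postive_exponent base exponent (power_postive_exponent base exponent)

-- ===== LEMMAS AND PROOFS =====

theorem powA_eq_pow (base : Int) : ∀ e : Nat, powA base e = base ^ e := by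
  intro e
  induction e using Nat.strong_induction_on with
  | _ e ih =>
    rw [powA]
    split
    · simp [*]
    · split
      · simp [*]
      · rename_i h0 h1
        rw [ih (e / 2) (by omega)]
        have he : e = 2 * (e / 2) + e % 2 := (Nat.div_add_mod e 2).symm.trans (by ring)
        split
        · rename_i hm
          conv_rhs => rw [he, hm]
          rw [pow_add, pow_mul]; ring
        · have hm : e % 2 = 0 := by omega
          conv_rhs => rw [he, hm]
          rw [pow_add, pow_mul]; ring

theorem powB_eq_pow : ∀ (e : Nat) (b acc : Int), powB b e acc = acc * b ^ e := by
  intro e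
  induction e using Nat.strong_induction_on with
  | _ e ih =>
    intro b acc
    rw [powB]
    split
    · simp [*]
    · rename_i h0
      rw [ih (e / 2) (by omega)]
      have he : e = 2 * (e / 2) + e % 2 := (Nat.div_add_mod e 2).symm.trans (by ring)
      have hbb : b * b = b ^ 2 := by ring
      split
      · rename_i hm
        conv_rhs => rw [he, hm]
        rw [hbb, ← pow_mul, pow_add]; ring
      · have hm : e % 2 = 0 := by omega
        conv_rhs => rw [he, hm]
        rw [hbb, ← pow_mul, pow_add]; ring

-- ===== VERDICT (by name: the statement is the Claim_ definition above) =====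
theorem power_postive_exponent_spec : Claim_equal_power_postive_exponent := by
  intro base exponent _ _
  unfold Spec_power_postive_exponent power_postive_exponent power_postive_exponent_alt
  rw [powA_eq_pow, powB_eq_pow, one_mul]
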